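-- pv_equiv track=rewrite | github.com/pypi-data/pypi-mirror-99 | packages/restarting-automata/Restarting_automata-0.0.2-py3-none-any.whl/Automata_lib/automata_class.py | __parse_text_to_list
-- ===== SOURCE A (Python) =====
-- def __parse_text_to_list(text):
--     parsed_text = []
--     ctr = 0
--     working_string = ""
--     for i in text:
--         if i == "[":
--             ctr += 1
--         elif i == "]":
--             ctr -= 1
--         working_string += i
--         if ctr == 0:
--             parsed_text.append(working_string)
--             working_string = ""
--     if ctr != 0:
--         raise Exception("[] are not in pairs")
--     return parsed_text
-- ===== SOURCE B (Python) =====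
-- def __parse_text_to_list(text):
--     # Pass 1: find the indices where the running bracket depth returns to 0.
--     ctr = 0
--     bounds = []
--     for i, ch in enumerate(text):
--         if ch == "[":
--             ctr += 1
--         elif ch == "]":
--             ctr -= 1
--         if ctr == 0:
--             bounds.append(i)
--     if ctr != 0:
--         raise Exception("[] are not in pairs")
--     # Pass 2: slice the text at those boundaries.
--     out = []
--     prev = 0
--     for b in bounds:
--         out.append(text[prev:b + 1])
--         prev = b + 1
--     return out
-- ===== Notes on version B (the rewrite author's own statement) =====
-- stated objective: alternative
-- what changed: B first scans the text once to collect the boundary indices where the running bracket depth returns to 0, then extracts the segments by slicing between consecutive boundaries, instead of A's single loop that accumulates characters into a working string character by character and cuts inline.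
import Mathlib
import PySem

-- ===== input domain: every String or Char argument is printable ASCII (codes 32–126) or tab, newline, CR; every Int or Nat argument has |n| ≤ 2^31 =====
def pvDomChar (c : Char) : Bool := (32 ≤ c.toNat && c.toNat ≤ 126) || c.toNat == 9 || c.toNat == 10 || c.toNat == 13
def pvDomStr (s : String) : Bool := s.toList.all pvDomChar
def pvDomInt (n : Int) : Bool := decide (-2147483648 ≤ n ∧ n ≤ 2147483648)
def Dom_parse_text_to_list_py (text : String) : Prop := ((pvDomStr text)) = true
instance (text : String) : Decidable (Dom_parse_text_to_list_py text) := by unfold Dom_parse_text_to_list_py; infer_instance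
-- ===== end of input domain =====

-- B finds the depth-0 boundary indices in one pass and then slices the text between
-- consecutive boundaries, instead of A's inline accumulation of a working string (objective: alternative).

-- ===== PORT A =====
-- bracket delta of one character
def pvDelta (c : Char) : Int := if c = '[' then 1 else if c = ']' then -1 else 0

-- one loop step of A: update ctr, extend working string, cut when ctr = 0
def pvStepA (st : List String × Int × List Char) (c : Char) : List String × Int × List Char :=
  let ctr := st.2.1 + pvDelta c
  let w := st.2.2 ++ [c]
  if ctr = 0 then (st.1 ++ [String.ofList w], ctr, []) else (st.1, ctr, w)

-- A's loop; the final `raise` is excluded by Pre_ (final ctr = 0 there)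
def parse_text_to_list_py (text : String) : List String :=
  (text.toList.foldl pvStepA ([], 0, [])).1

-- ===== PORT B =====
-- pass 1: indices i (0-based) where the running depth after text[i] is 0
def pvBounds (cs : List Char) (i : Nat) (ctr : Int) : List Nat :=
  match cs with
  | [] => []
  | c :: r =>
    let ctr' := ctr + pvDelta c
    if ctr' = 0 then i :: pvBounds r (i + 1) ctr' else pvBounds r (i + 1) ctr'

-- pass 2: slice text[prev : b+1] for each boundary b
def pvSlices (cs : List Char) (bs : List Nat) (prev : Nat) : List String :=
  match bs with
  | [] => []
  | b :: rest => String.ofList ((cs.drop prev).take (b + 1 - prev)) :: pvSlices cs rest (b + 1)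

def parse_text_to_list_py_alt (text : String) : List String :=
  pvSlices text.toList (pvBounds text.toList 0 0) 0

-- ===== PRECONDITION & SPEC =====
-- Pre_ excludes exactly the inputs on which A raises its unbalanced-brackets exception:
-- the final counter is count('[') − count(']'), so balanced counts ⟺ A returns.
def Pre_parse_text_to_list_py (text : String) : Prop :=
  text.toList.count '[' = text.toList.count ']'
instance (text : String) : Decidable (Pre_parse_text_to_list_py text) := by
  unfold Pre_parse_text_to_list_py; infer_instance

def pvWitness_parse_text_to_list_py : String := "a[b]c"

def Spec_parse_text_to_list_py (text : String) (out : List String) : Prop := out = parse_text_to_list_py_alt text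
instance (text : String) (out : List String) : Decidable (Spec_parse_text_to_list_py text out) := by unfold Spec_parse_text_to_list_py; infer_instance

-- ===== CLAIM (what is proved, stated in full; the proofs are below) =====
def Claim_equal_parse_text_to_list_py : Prop := ∀ (text : String), Dom_parse_text_to_list_py text → Pre_parse_text_to_list_py text → Spec_parse_text_to_list_py text (parse_text_to_list_py text)

-- ===== LEMMAS AND PROOFS =====

-- common recursive specification of the segment list
def pvSegs (cs : List Char) (ctr : Int) (w : List Char) : List String :=
  match cs with
  | [] => []
  | c :: r =>
    let ctr' := ctr + pvDelta c
    if ctr' = 0 then String.ofList (w ++ [c]) :: pvSegs r 0 [] else pvSegs r ctr' (w ++ [c])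

theorem pvFoldA_eq_segs (cs : List Char) (p : List String) (ctr : Int) (w : List Char) :
    (cs.foldl pvStepA (p, ctr, w)).1 = p ++ pvSegs cs ctr w := by
  induction cs generalizing p ctr w with
  | nil => simp [pvSegs]
  | cons c r ih =>
    simp only [List.foldl_cons, pvStepA, pvSegs]
    by_cases h : ctr + pvDelta c = 0
    · simp [h, ih]
    · simp [h, ih]

theorem pvSlices_eq_segs (cs0 : List Char) (rest : List Char) (prev : Nat) (ctr : Int)
    (w : List Char) (hsplit : cs0.drop prev = w ++ rest) :
    pvSlices cs0 (pvBounds rest (prev + w.length) ctr) prev = pvSegs rest ctr w := by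
  induction rest generalizing prev ctr w with
  | nil => simp [pvBounds, pvSegs, pvSlices]
  | cons c r ih =>
    simp only [pvBounds, pvSegs]
    have htake : (cs0.drop prev).take (prev + w.length + 1 - prev) = w ++ [c] := by
      rw [hsplit, show prev + w.length + 1 - prev = w.length + 1 by omega,
        show w.length + 1 = (w ++ [c]).length by simp,
        show w ++ c :: r = (w ++ [c]) ++ r by simp, List.take_left]
    have hdrop : cs0.drop (prev + w.length + 1) = r := by
      have h2 : (cs0.drop prev).drop (w.length + 1) = r := by
        rw [hsplit, show w.length + 1 = (w ++ [c]).length by simp,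
          show w ++ c :: r = (w ++ [c]) ++ r by simp, List.drop_left]
      rw [List.drop_drop] at h2
      convert h2 using 2
    by_cases h : ctr + pvDelta c = 0
    · simp only [h, reduceIte, pvSlices, htake]
      have := ih (prev := prev + w.length + 1) (ctr := 0) (w := []) (by simpa using hdrop)
      simpa using this
    · simp only [h, reduceIte]
      have := ih (prev := prev) (ctr := ctr + pvDelta c) (w := w ++ [c]) (by rw [hsplit]; simp)
      simpa [Nat.add_assoc] using this

-- ===== VERDICT (by name: the statement is the Claim_ definition above) =====
theorem parse_text_to_list_py_spec : Claim_equal_parse_text_to_list_py := by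
  intro text _ _
  unfold Spec_parse_text_to_list_py parse_text_to_list_py parse_text_to_list_py_alt
  rw [pvFoldA_eq_segs]
  have h := pvSlices_eq_segs text.toList text.toList 0 0 [] (by simp)
  simpa using h.symm
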